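-- pv_equiv track=rewrite | github.com/MDoerner/AdventOfCode2019 | AdventOfCodeIn2019InPython/AdventOfCode20191203_2.py | wire_step_distance
-- ===== SOURCE A (Python) =====
-- def is_in_section(point, section):
--     (x, y) = point
--     ((x_1, y_1), (x_2, y_2)) = section
--     return (x_1 <= x <= x_2 or x_1 >= x >= x_2) and (y_1 <= y <= y_2 or y_1 >= y >= y_2)
--
-- def wire_step_distance(intersection, absolute_wire):
--     total_distance = 0
--     for section in absolute_wire:
--         (start_point, end_point) = section
--         if is_in_section(intersection, section):
--             return total_distance + manhatten_distance(start_point, intersection)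
--         total_distance = total_distance + manhatten_distance(start_point, end_point)
--     return None
--
-- def manhatten_distance(point1, point2):
--     (x1, y1) = point1
--     (x2, y2) = point2
--     return abs(x1 - x2) + abs(y1 - y2)
-- ===== SOURCE B (Python) =====
-- def is_in_section(point, section):
--     (x, y) = point
--     ((x_1, y_1), (x_2, y_2)) = section
--     return (x_1 <= x <= x_2 or x_1 >= x >= x_2) and (y_1 <= y <= y_2 or y_1 >= y >= y_2)
--
-- def manhatten_distance(point1, point2):
--     (x1, y1) = point1
--     (x2, y2) = point2
--     return abs(x1 - x2) + abs(y1 - y2)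
--
-- def wire_step_distance(intersection, absolute_wire):
--     # locate-then-sum: find the first bracketing section, then sum the prefix
--     idx = next((i for i, sec in enumerate(absolute_wire) if is_in_section(intersection, sec)), None)
--     if idx is None:
--         return None
--     prefix = sum(manhatten_distance(s, e) for (s, e) in absolute_wire[:idx])
--     return prefix + manhatten_distance(absolute_wire[idx][0], intersection)
-- ===== Notes on version B (the rewrite author's own statement) =====
-- stated objective: alternative
-- what changed: Replaces A's single pass with a threaded running-total accumulator by a locate-then-sum decomposition: first find the index of the first bracketing section, then separately sum the lengths of the prefix sections and add the distance into the matched section.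
import Mathlib
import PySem

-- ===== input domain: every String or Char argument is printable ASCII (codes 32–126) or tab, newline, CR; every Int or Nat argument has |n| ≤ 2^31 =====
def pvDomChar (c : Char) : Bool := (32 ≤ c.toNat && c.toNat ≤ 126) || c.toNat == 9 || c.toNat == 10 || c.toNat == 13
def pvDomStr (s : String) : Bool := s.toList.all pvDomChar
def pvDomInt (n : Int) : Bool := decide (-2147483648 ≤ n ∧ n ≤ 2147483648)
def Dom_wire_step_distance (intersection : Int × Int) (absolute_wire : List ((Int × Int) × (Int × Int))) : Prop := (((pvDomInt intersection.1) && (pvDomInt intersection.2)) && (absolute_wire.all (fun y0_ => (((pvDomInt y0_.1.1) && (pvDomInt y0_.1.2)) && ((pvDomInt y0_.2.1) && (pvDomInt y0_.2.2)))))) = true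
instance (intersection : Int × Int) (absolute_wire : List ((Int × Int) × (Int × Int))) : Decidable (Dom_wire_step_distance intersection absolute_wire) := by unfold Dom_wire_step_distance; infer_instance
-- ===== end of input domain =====

-- B replaces A's single accumulator-threading pass by a locate-then-sum decomposition (find first bracketing section, then sum the prefix); alternative structure, same O(n) cost.
-- ===== PORT A =====
def manhatten_distance (point1 point2 : Int × Int) : Int :=
  |point1.1 - point2.1| + |point1.2 - point2.2|

def is_in_section (point : Int × Int) (sec : (Int × Int) × (Int × Int)) : Bool :=
  ((sec.1.1 ≤ point.1 && point.1 ≤ sec.2.1) || (sec.1.1 ≥ point.1 && point.1 ≥ sec.2.1)) &&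
  ((sec.1.2 ≤ point.2 && point.2 ≤ sec.2.2) || (sec.1.2 ≥ point.2 && point.2 ≥ sec.2.2))

-- A's loop with the running total threaded through
def wire_step_distance_loop (intersection : Int × Int) (total_distance : Int) :
    List ((Int × Int) × (Int × Int)) → Option Int
  | [] => none
  | sec :: rest =>
    if is_in_section intersection sec then
      some (total_distance + manhatten_distance sec.1 intersection)
    else
      wire_step_distance_loop intersection (total_distance + manhatten_distance sec.1 sec.2) rest

def wire_step_distance (intersection : Int × Int) (absolute_wire : List ((Int × Int) × (Int × Int))) : Option Int :=
  wire_step_distance_loop intersection 0 absolute_wire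

-- ===== PORT B =====
-- B: locate the first bracketing section, then sum the prefix lengths separately
def wire_step_distance_alt (intersection : Int × Int) (absolute_wire : List ((Int × Int) × (Int × Int))) : Option Int :=
  match absolute_wire.findIdx? (fun sec => is_in_section intersection sec) with
  | none => none
  | some idx =>
    match absolute_wire[idx]? with
    | none => none
    | some sec =>
      let pre := ((absolute_wire.take idx).map (fun s => manhatten_distance s.1 s.2)).sum
      some (pre + manhatten_distance sec.1 intersection)

-- ===== PRECONDITION & SPEC =====
def Spec_wire_step_distance (intersection : Int × Int) (absolute_wire : List ((Int × Int) × (Int × Int))) (out : Option Int) : Prop := out = wire_step_distance_alt intersection absolute_wire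
instance (intersection : Int × Int) (absolute_wire : List ((Int × Int) × (Int × Int))) (out : Option Int) : Decidable (Spec_wire_step_distance intersection absolute_wire out) := by unfold Spec_wire_step_distance; infer_instance

-- ===== CLAIM (what is proved, stated in full; the proofs are below) =====
def Claim_equal_wire_step_distance : Prop := ∀ (intersection : Int × Int) (absolute_wire : List ((Int × Int) × (Int × Int))), Dom_wire_step_distance intersection absolute_wire → Spec_wire_step_distance intersection absolute_wire (wire_step_distance intersection absolute_wire)

-- ===== LEMMAS AND PROOFS =====

lemma alt_cons_neg (i : Int × Int) (sec : (Int × Int) × (Int × Int))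
    (rest : List ((Int × Int) × (Int × Int))) (h : is_in_section i sec = false) :
    wire_step_distance_alt i (sec :: rest) =
      (wire_step_distance_alt i rest).map (fun r => manhatten_distance sec.1 sec.2 + r) := by
  unfold wire_step_distance_alt
  cases hf : rest.findIdx? (fun s => is_in_section i s) with
  | none => simp [List.findIdx?_cons, h, hf]
  | some idx =>
    have h1 : 1 + idx = idx + 1 := Nat.add_comm 1 idx
    simp only [List.findIdx?_cons, h, Bool.false_eq_true, if_false, hf, Option.map_some, h1]
    cases hg : rest[idx]? with
    | none => simp [hg]
    | some s =>
      simp only [hg, List.getElem?_cons_succ, List.take_succ_cons, List.map_cons, List.sum_cons,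
        Option.map_some]
      ring_nf

lemma loop_eq_alt (i : Int × Int) (w : List ((Int × Int) × (Int × Int))) (t : Int) :
    wire_step_distance_loop i t w = (wire_step_distance_alt i w).map (fun r => t + r) := by
  induction w generalizing t with
  | nil => simp [wire_step_distance_loop, wire_step_distance_alt]
  | cons sec rest ih =>
    by_cases h : is_in_section i sec
    · simp [wire_step_distance_loop, h, wire_step_distance_alt, List.findIdx?_cons]
    · rw [wire_step_distance_loop]
      simp only [h, if_false, Bool.false_eq_true]
      rw [ih, alt_cons_neg i sec rest (by simpa using h), Option.map_map]
      cases wire_step_distance_alt i rest <;> simp <;> ring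

-- ===== VERDICT =====
theorem wire_step_distance_spec : Claim_equal_wire_step_distance := by
  intro i w _
  unfold Spec_wire_step_distance wire_step_distance
  rw [loop_eq_alt]
  cases wire_step_distance_alt i w <;> simp
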